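-- pv_equiv track=rewrite | github.com/lgessler/microbert2 | microbert2/sgcl/generation_common.py | subtree_of_id
-- ===== SOURCE A (Python) =====
-- from typing import Dict, List, Set
--
-- def immediate_children(head_map: Dict[int, int | None], token_id: int) -> List[int]:
--     return [child for child, parent in head_map.items() if parent == token_id]
--
-- def subtree_of_id(head_map: Dict[int, int | None], token_id: int) -> Dict[int, int | None]:
--     """Get the subtree rooted at a given ID."""
--     subtree = {token_id: None}
--     queue = immediate_children(head_map, token_id)
--     while len(queue) > 0:
--         token_id = queue.pop(0)
--         subtree[token_id] = head_map[token_id]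
--         children = immediate_children(head_map, token_id)
--         queue.extend(children)
--     return subtree
-- ===== SOURCE B (Python) =====
-- def subtree_of_id(head_map, token_id):
--     """Get the subtree rooted at a given ID."""
--     children = {}
--     for child, parent in head_map.items():
--         children.setdefault(parent, []).append(child)
--     subtree = {token_id: None}
--     frontier = children.get(token_id, [])
--     while frontier:
--         nxt = []
--         for t in frontier:
--             subtree[t] = head_map[t]
--             nxt.extend(children.get(t, []))
--         frontier = nxt
--     return subtree
-- ===== Notes on version B (the rewrite author's own statement) =====
-- stated objective: alternative
-- what changed: B precomputes a parent->children adjacency dict in one pass and then expands the subtree level by level (whole-frontier BFS), instead of A's pop(0) queue that rescans all of head_map for the children of every dequeued token.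
import Mathlib
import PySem

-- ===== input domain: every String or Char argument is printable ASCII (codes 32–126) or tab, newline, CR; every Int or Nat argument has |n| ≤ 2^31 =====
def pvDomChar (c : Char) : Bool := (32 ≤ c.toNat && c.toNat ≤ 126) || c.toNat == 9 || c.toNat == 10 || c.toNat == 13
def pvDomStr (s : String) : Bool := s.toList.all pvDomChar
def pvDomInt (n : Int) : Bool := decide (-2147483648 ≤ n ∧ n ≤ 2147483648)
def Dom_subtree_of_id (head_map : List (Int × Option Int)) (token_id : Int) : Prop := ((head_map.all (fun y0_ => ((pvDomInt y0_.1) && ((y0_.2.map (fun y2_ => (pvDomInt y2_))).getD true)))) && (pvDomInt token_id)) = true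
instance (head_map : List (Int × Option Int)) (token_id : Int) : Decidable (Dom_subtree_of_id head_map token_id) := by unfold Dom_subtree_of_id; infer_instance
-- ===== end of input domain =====

-- B builds a parent→children adjacency dict once and expands the subtree level by level,
-- replacing A's per-token rescans of head_map (objective: alternative).


-- ===== PORT A =====
-- [child for child, parent in head_map.items() if parent == token_id]
def immediate_children (d : PySem.Dict Int (Option Int)) (token_id : Int) : List Int :=
  (d.items.filter (fun p => p.2 == some token_id)).map (·.1)

-- the while loop of A; fuel bounds the pops (on acyclic maps each key is enqueued at
-- most once, so head_map.length + 1 fuel is never exhausted where Python A returns).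
-- head_map[token_id]: queue elements are keys of d, so `.getD none` is never the
-- missing-key (KeyError) case on any input A returns on.
def subtreeLoopA (d : PySem.Dict Int (Option Int)) :
    Nat → PySem.Dict Int (Option Int) → List Int → PySem.Dict Int (Option Int)
  | _, subtree, [] => subtree
  | 0, subtree, _ :: _ => subtree
  | fuel + 1, subtree, t :: rest =>
      subtreeLoopA d fuel (subtree.insert t ((d.get? t).getD none))
        (rest ++ immediate_children d t)

def subtree_of_id (head_map : List (Int × Option Int)) (token_id : Int) : List (Int × Option Int) :=
  let d := PySem.Dict.ofList head_map
  (subtreeLoopA d (head_map.length + 1)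
      ((PySem.Dict.empty).insert token_id none)
      (immediate_children d token_id)).items

-- ===== PORT B =====
-- for child, parent in head_map.items(): children.setdefault(parent, []).append(child)
def childrenMap (d : PySem.Dict Int (Option Int)) : PySem.Dict (Option Int) (List Int) :=
  d.items.foldl (fun ch p => ch.modify p.2 [] (· ++ [p.1])) PySem.Dict.empty

-- Source B's inner `for t in frontier:` — inserts each frontier token and collects its
-- children into the next frontier.  The fuel it threads counts inserted tokens (the
-- same totalisation measure as A's pop fuel); when it runs out the rest of the
-- frontier is dropped, which only happens where Python B (and A) loops forever.
def processLevel (d : PySem.Dict Int (Option Int)) (ch : PySem.Dict (Option Int) (List Int)) :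
    Nat → PySem.Dict Int (Option Int) → List Int →
      Nat × PySem.Dict Int (Option Int) × List Int
  | fuel, subtree, [] => (fuel, subtree, [])
  | 0, subtree, _ :: _ => (0, subtree, [])
  | fuel + 1, subtree, t :: rest =>
      let r := processLevel d ch fuel (subtree.insert t ((d.get? t).getD none)) rest
      (r.1, r.2.1, ch.getD (some t) [] ++ r.2.2)

theorem processLevel_fuel_le (d : PySem.Dict Int (Option Int))
    (ch : PySem.Dict (Option Int) (List Int)) :
    ∀ (fuel : Nat) (s : PySem.Dict Int (Option Int)) (fr : List Int),
      (processLevel d ch fuel s fr).1 ≤ fuel := by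
  intro fuel
  induction fuel with
  | zero => intro s fr; cases fr <;> simp [processLevel]
  | succ f ih =>
      intro s fr
      cases fr with
      | nil => simp [processLevel]
      | cons t rest => exact Nat.le_trans (ih _ _) (Nat.le_succ f)

-- Source B's outer `while frontier:` over whole levels
def levelLoopB (d : PySem.Dict Int (Option Int)) (ch : PySem.Dict (Option Int) (List Int)) :
    Nat → PySem.Dict Int (Option Int) → List Int → PySem.Dict Int (Option Int)
  | _, subtree, [] => subtree
  | 0, subtree, _ :: _ => subtree
  | fuel + 1, subtree, t :: rest =>
      let r := processLevel d ch (fuel + 1) subtree (t :: rest)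
      levelLoopB d ch r.1 r.2.1 r.2.2
  termination_by fuel _ fr => fuel
  decreasing_by
    exact Nat.lt_succ_of_le (processLevel_fuel_le d ch fuel _ rest)

def subtree_of_id_alt (head_map : List (Int × Option Int)) (token_id : Int) : List (Int × Option Int) :=
  let d := PySem.Dict.ofList head_map
  let ch := childrenMap d
  (levelLoopB d ch (head_map.length + 1)
      ((PySem.Dict.empty).insert token_id none)
      (ch.getD (some token_id) [])).items

-- ===== PRECONDITION & SPEC =====
def Spec_subtree_of_id (head_map : List (Int × Option Int)) (token_id : Int) (out : List (Int × Option Int)) : Prop := out = subtree_of_id_alt head_map token_id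
instance (head_map : List (Int × Option Int)) (token_id : Int) (out : List (Int × Option Int)) : Decidable (Spec_subtree_of_id head_map token_id out) := by unfold Spec_subtree_of_id; infer_instance

-- ===== CLAIM (what is proved, stated in full; the proofs are below) =====
def Claim_equal_subtree_of_id : Prop := ∀ (head_map : List (Int × Option Int)) (token_id : Int), Dom_subtree_of_id head_map token_id → Spec_subtree_of_id head_map token_id (subtree_of_id head_map token_id)

-- ===== LEMMAS AND PROOFS =====

-- the adjacency dict, looked up at a token, is exactly A's scan for its immediate children
theorem childrenMap_getD (d : PySem.Dict Int (Option Int)) (t : Int) :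
    (childrenMap d).getD (some t) [] = immediate_children d t := by
  unfold childrenMap immediate_children
  have h := PySem.Dict.getD_foldl_modify_append
      (d.items.map (fun p : Int × Option Int => (p.2, p.1))) PySem.Dict.empty (some t)
  rw [List.foldl_map] at h
  simpa [List.filter_map, Function.comp_def] using h

-- A, while working through a queue prefix q (with tail behind it), does exactly what
-- one (partial) level step of B does to q, and continues on the remainder.
theorem loopA_level (d : PySem.Dict Int (Option Int)) :
    ∀ (q : List Int) (fuel : Nat) (s : PySem.Dict Int (Option Int)) (tail : List Int),
      subtreeLoopA d fuel s (q ++ tail) =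
        (let r := processLevel d (childrenMap d) fuel s q
         subtreeLoopA d r.1 r.2.1 (tail ++ r.2.2)) := by
  intro q
  induction q with
  | nil => intro fuel s tail; simp [processLevel]
  | cons t q' ih =>
      intro fuel s tail
      cases fuel with
      | zero => cases tail <;> simp [processLevel, subtreeLoopA]
      | succ f =>
          simp only [List.cons_append, subtreeLoopA, processLevel, childrenMap_getD]
          rw [List.append_assoc, ih]
          simp [List.append_assoc]

theorem loopA_eq_levelLoopB (d : PySem.Dict Int (Option Int)) :
    ∀ (fuel : Nat) (s : PySem.Dict Int (Option Int)) (q : List Int),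
      subtreeLoopA d fuel s q = levelLoopB d (childrenMap d) fuel s q := by
  intro fuel
  induction fuel using Nat.strong_induction_on with
  | _ fuel ih =>
      intro s q
      cases q with
      | nil => cases fuel <;> simp [subtreeLoopA, levelLoopB]
      | cons t rest =>
          cases fuel with
          | zero => simp [subtreeLoopA, levelLoopB]
          | succ f =>
              rw [levelLoopB]
              have h := loopA_level d (t :: rest) (f + 1) s []
              simp only [List.append_nil, List.nil_append] at h
              rw [h]
              have hle : (processLevel d (childrenMap d) (f + 1) s (t :: rest)).1 ≤ f := by
                simpa [processLevel] using
                  processLevel_fuel_le d (childrenMap d) f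
                    (s.insert t ((d.get? t).getD none)) rest
              exact ih _ (Nat.lt_succ_of_le hle) _ _

-- ===== VERDICT (by name: the statement is the Claim_ definition above) =====
theorem subtree_of_id_spec : Claim_equal_subtree_of_id := by
  intro head_map token_id _
  unfold Spec_subtree_of_id subtree_of_id subtree_of_id_alt
  simp only [loopA_eq_levelLoopB, childrenMap_getD]
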